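-- pv_equiv track=rewrite | github.com/MilesYeah/APythonBasicSummary | Library.库/BuiltIn/二进制数据/struct/t.py | unpack6bitascii
-- ===== SOURCE A (Python) =====
-- def unpack6bitascii(inputdata):
--     # This is a text encoding scheme that seems unique
--     # to IPMI FRU.  It seems to be relatively rare in practice
--     result = ''
--     while len(inputdata) > 0:
--
--         currchunk = inputdata[:3]
--         del inputdata[:3]
--         currchar = currchunk[0] & 0b111111
--         result += chr(0x20 + currchar)
--
--         currchar = (currchunk[0] & 0b11000000) >> 6
--         currchar |= (currchunk[1] & 0b1111) << 2
--         result += chr(0x20 + currchar)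
--
--         currchar = (currchunk[1] & 0b11110000) >> 4
--         currchar |= (currchunk[2] & 0b11) << 4
--         result += chr(0x20 + currchar)
--
--         currchar = (currchunk[2] & 0b11111100) >> 2
--         result += chr(0x20 + currchar)
--     return result
-- ===== SOURCE B (Python) =====
-- def unpack6bitascii(inputdata):
--     # Combine each 3-byte group into one 24-bit little-endian word and extract
--     # the four 6-bit fields uniformly; empties inputdata at the end like A does.
--     out = []
--     for i in range(0, len(inputdata), 3):
--         val = (inputdata[i] & 0xff) \
--             + ((inputdata[i + 1] & 0xff) << 8) \
--             + ((inputdata[i + 2] & 0xff) << 16)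
--         for k in range(4):
--             out.append(chr(0x20 + ((val >> (6 * k)) & 0x3f)))
--     del inputdata[:]
--     return ''.join(out)
-- ===== Notes on version B (the rewrite author's own statement) =====
-- stated objective: simpler
-- what changed: Instead of four bespoke masked/shifted two-byte expressions per chunk, B combines each 3-byte group into one 24-bit little-endian word and extracts the four 6-bit fields with one uniform formula, collecting chars in a list joined once at the end.
import Mathlib
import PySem

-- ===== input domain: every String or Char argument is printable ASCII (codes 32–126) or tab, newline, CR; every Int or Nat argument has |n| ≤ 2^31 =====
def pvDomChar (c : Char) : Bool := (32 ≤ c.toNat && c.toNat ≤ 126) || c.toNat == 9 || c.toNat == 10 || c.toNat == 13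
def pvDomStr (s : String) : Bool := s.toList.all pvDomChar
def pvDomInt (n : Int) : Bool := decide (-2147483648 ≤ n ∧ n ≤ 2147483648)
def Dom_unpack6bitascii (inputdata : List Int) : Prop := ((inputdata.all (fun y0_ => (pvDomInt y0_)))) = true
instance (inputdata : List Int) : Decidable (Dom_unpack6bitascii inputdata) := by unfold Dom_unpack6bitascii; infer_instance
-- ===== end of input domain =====

-- B combines each 3-byte group into one 24-bit word and extracts the four 6-bit fields
-- uniformly (objective: simpler); in Python both A and B empty the argument list in place —
-- the equivalence proved here is about the return value.

-- ===== PORT A =====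
-- A's while loop: slice off the first 3 bytes, delete them, append four masked/shifted chars.
-- currchunk[1] / currchunk[2] raise IndexError in Python when the chunk is short; Pre_
-- excludes those inputs, so the `.getD 0` default is never observed inside Pre_.
def unpackLoopA : List Int → String → String
  | [], result => result
  | x :: xs, result =>
    let currchunk := (x :: xs).take 3          -- inputdata[:3]
    let c0 := (PySem.List.pyGet? currchunk 0).getD 0
    let c1 := (PySem.List.pyGet? currchunk 1).getD 0
    let c2 := (PySem.List.pyGet? currchunk 2).getD 0
    let r1 := result.push (Char.ofNat (0x20 + PySem.Int.band c0 63).toNat)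
    let r2 := r1.push (Char.ofNat (0x20 + PySem.Int.bor ((PySem.Int.band c0 192) >>> (6:Nat)) ((PySem.Int.band c1 15) <<< (2:Nat))).toNat)
    let r3 := r2.push (Char.ofNat (0x20 + PySem.Int.bor ((PySem.Int.band c1 240) >>> (4:Nat)) ((PySem.Int.band c2 3) <<< (4:Nat))).toNat)
    let r4 := r3.push (Char.ofNat (0x20 + (PySem.Int.band c2 252) >>> (2:Nat)).toNat)
    unpackLoopA ((x :: xs).drop 3) r4          -- del inputdata[:3]
  termination_by l _ => l.length
  decreasing_by simp

def unpack6bitascii (inputdata : List Int) : String := unpackLoopA inputdata ""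

-- ===== PORT B =====
-- the inner `for k in range(4)` appending chr(0x20 + ((val >> 6*k) & 0x3f))
def altInner (val : Int) : List Char :=
  (PySem.List.pyRange 0 4 1).map
    (fun k => Char.ofNat (0x20 + PySem.Int.band (val >>> (6 * k).toNat) 63).toNat)

-- B indexes the list (raising IndexError on a short trailing group exactly like A; Pre_
-- excludes that, so `.getD 0` is never observed) and joins the collected chars at the end.
def unpack6bitascii_alt (inputdata : List Int) : String :=
  let out : List Char :=
    (PySem.List.pyRange 0 (PySem.List.len inputdata) 3).foldl
      (fun acc i =>
        let val : Int :=
          PySem.Int.band ((PySem.List.pyGet? inputdata i).getD 0) 255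
          + (PySem.Int.band ((PySem.List.pyGet? inputdata (i + 1)).getD 0) 255) <<< (8:Nat)
          + (PySem.Int.band ((PySem.List.pyGet? inputdata (i + 2)).getD 0) 255) <<< (16:Nat)
        acc ++ altInner val) []
  String.ofList out

-- ===== PRECONDITION & SPEC =====
-- Pre_: on a trailing group of 1 or 2 bytes both Pythons raise IndexError, so the length
-- must be a multiple of 3.
def Pre_unpack6bitascii (inputdata : List Int) : Prop := inputdata.length % 3 = 0
instance (inputdata : List Int) : Decidable (Pre_unpack6bitascii inputdata) := by unfold Pre_unpack6bitascii; infer_instance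
def pvWitness_unpack6bitascii : List Int := [41, 220, 166]

def Spec_unpack6bitascii (inputdata : List Int) (out : String) : Prop := out = unpack6bitascii_alt inputdata
instance (inputdata : List Int) (out : String) : Decidable (Spec_unpack6bitascii inputdata out) := by unfold Spec_unpack6bitascii; infer_instance

-- ===== CLAIM (what is proved, stated in full; the proofs are below) =====
def Claim_equal_unpack6bitascii : Prop := ∀ (inputdata : List Int), Dom_unpack6bitascii inputdata → Pre_unpack6bitascii inputdata → Spec_unpack6bitascii inputdata (unpack6bitascii inputdata)

-- ===== LEMMAS AND PROOFS =====

-- the low byte `a & 0xff` of a Python int, as a Nat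
def pvByte (a : Int) : Nat := (PySem.Int.band a 255).toNat

-- A's four chars for one chunk, exactly as unpackLoopA computes them
def aChunk (c0 c1 c2 : Int) : List Char :=
  [Char.ofNat (0x20 + PySem.Int.band c0 63).toNat,
   Char.ofNat (0x20 + PySem.Int.bor ((PySem.Int.band c0 192) >>> (6:Nat)) ((PySem.Int.band c1 15) <<< (2:Nat))).toNat,
   Char.ofNat (0x20 + PySem.Int.bor ((PySem.Int.band c1 240) >>> (4:Nat)) ((PySem.Int.band c2 3) <<< (4:Nat))).toNat,
   Char.ofNat (0x20 + (PySem.Int.band c2 252) >>> (2:Nat)).toNat]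

-- B's 24-bit word for one chunk, exactly as unpack6bitascii_alt computes it
def bVal (c0 c1 c2 : Int) : Int :=
  PySem.Int.band c0 255 + (PySem.Int.band c1 255) <<< (8:Nat) + (PySem.Int.band c2 255) <<< (16:Nat)

theorem pvByte_lt (a : Int) : pvByte a < 256 := by
  unfold pvByte PySem.Int.band
  split_ifs with h1 h2 h2
  · have := @Nat.and_le_right a.toNat 255; simp; omega
  · omega
  · simp; omega
  · omega

theorem band255_eq_byte (a : Int) : PySem.Int.band a 255 = (pvByte a : Int) := by
  unfold pvByte
  refine (Int.toNat_of_nonneg ?_).symm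
  rw [PySem.Int.band_comm]
  exact PySem.Int.band_nonneg_of_nonneg_left a (by norm_num)

-- `a & sub` for a submask of 0xff depends only on the low byte of `a`
theorem band_byte (a : Int) (sub : Nat)
    (h255 : 255 &&& sub = sub)
    (h255' : sub &&& 255 = sub)
    (h2 : ∀ r < 256, sub - (sub &&& r) = (255 - r) &&& sub) :
    PySem.Int.band a (sub : Int) = ((pvByte a &&& sub : Nat) : Int) := by
  have h255n : (255:Int).toNat = 255 := rfl
  unfold pvByte PySem.Int.band
  by_cases ha : 0 ≤ a
  · rw [if_pos ha, if_pos ha, if_pos (show (0:Int) ≤ (sub:Int) by positivity),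
        if_pos (show (0:Int) ≤ (255:Int) by norm_num)]
    simp only [Int.toNat_natCast, h255n]
    rw [Nat.and_assoc, h255]
  · rw [if_neg ha, if_neg ha, if_pos (show (0:Int) ≤ (sub:Int) by positivity),
        if_pos (show (0:Int) ≤ (255:Int) by norm_num)]
    simp only [Int.toNat_natCast, h255n]
    set p := (-a - 1).toNat with hp
    have hr : 255 &&& p = p % 256 := by
      rw [Nat.and_comm]
      have := Nat.and_two_pow_sub_one_eq_mod p 8
      norm_num at this
      exact this
    have hsubp : sub &&& p = sub &&& (p % 256) := by
      conv_lhs => rw [← h255', Nat.and_assoc, hr]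
    rw [hsubp, hr]
    exact_mod_cast h2 (p % 256) (Nat.mod_lt _ (by norm_num))

theorem and63 (x : Nat) : x &&& 63 = x % 64 := by
  have := Nat.and_two_pow_sub_one_eq_mod x 6; norm_num at this; exact this

set_option maxRecDepth 100000 in
theorem pvD1 : ∀ m < 256, (m &&& 192) / 64 = m / 64 := by decide
set_option maxRecDepth 100000 in
theorem pvD2 : ∀ m < 256, m &&& 15 = m % 16 := by decide
set_option maxRecDepth 100000 in
theorem pvD3 : ∀ m < 256, (m &&& 240) / 16 = m / 16 % 16 := by decide
set_option maxRecDepth 100000 in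
theorem pvD4 : ∀ m < 256, m &&& 3 = m % 4 := by decide
set_option maxRecDepth 100000 in
theorem pvD5 : ∀ m < 256, (m &&& 252) / 4 = m / 4 := by decide
set_option maxRecDepth 100000 in
theorem pvD6 : ∀ x < 4, ∀ y < 16, x ||| y * 4 = x + y * 4 := by decide
set_option maxRecDepth 100000 in
theorem pvD7 : ∀ x < 16, ∀ y < 4, x ||| y * 16 = x + y * 16 := by decide

theorem pvG0 (m0 m1 m2 : Nat) :
    m0 &&& 63 = (m0 + (m1 <<< 8) + (m2 <<< 16)) &&& 63 := by
  rw [Nat.shiftLeft_eq, Nat.shiftLeft_eq, and63, and63]; norm_num; omega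

theorem pvG1 (m0 m1 m2 : Nat) (h0 : m0 < 256) (h1 : m1 < 256) :
    (m0 &&& 192) >>> 6 ||| (m1 &&& 15) <<< 2 = ((m0 + (m1 <<< 8) + (m2 <<< 16)) >>> 6) &&& 63 := by
  rw [Nat.shiftLeft_eq, Nat.shiftLeft_eq, Nat.shiftLeft_eq, Nat.shiftRight_eq_div_pow,
      Nat.shiftRight_eq_div_pow, and63]
  norm_num
  rw [pvD1 m0 h0, pvD2 m1 h1, pvD6 (m0 / 64) (by omega) (m1 % 16) (by omega)]
  omega

theorem pvG2 (m0 m1 m2 : Nat) (h0 : m0 < 256) (h1 : m1 < 256) (h2 : m2 < 256) :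
    (m1 &&& 240) >>> 4 ||| (m2 &&& 3) <<< 4 = ((m0 + (m1 <<< 8) + (m2 <<< 16)) >>> 12) &&& 63 := by
  rw [Nat.shiftLeft_eq, Nat.shiftLeft_eq, Nat.shiftLeft_eq, Nat.shiftRight_eq_div_pow,
      Nat.shiftRight_eq_div_pow, and63]
  norm_num
  rw [pvD3 m1 h1, pvD4 m2 h2, pvD7 (m1 / 16 % 16) (by omega) (m2 % 4) (by omega)]
  omega

theorem pvG3 (m0 m1 m2 : Nat) (h0 : m0 < 256) (h1 : m1 < 256) (h2 : m2 < 256) :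
    (m2 &&& 252) >>> 2 = ((m0 + (m1 <<< 8) + (m2 <<< 16)) >>> 18) &&& 63 := by
  rw [Nat.shiftLeft_eq, Nat.shiftLeft_eq, Nat.shiftRight_eq_div_pow, Nat.shiftRight_eq_div_pow,
      and63]
  norm_num
  rw [pvD5 m2 h2]
  omega

theorem bVal_eq (c0 c1 c2 : Int) :
    bVal c0 c1 c2 = ((pvByte c0 + (pvByte c1 <<< 8) + (pvByte c2 <<< 16) : Nat) : Int) := by
  unfold bVal
  rw [band255_eq_byte, band255_eq_byte, band255_eq_byte,
      Nat.cast_add, Nat.cast_add, Int.natCast_shiftLeft, Int.natCast_shiftLeft]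

theorem band_cast63 (N k : Nat) :
    PySem.Int.band ((N:Int) >>> ((k:Nat):Int)) 63 = ((N >>> k &&& 63 : Nat) : Int) := by
  have hs : ((N:Int) >>> ((k:Nat):Int)) = ((N >>> k : Nat) : Int) := by simp [Int.shiftRight_eq]
  rw [hs]
  have := PySem.Int.band_natCast (N >>> k) 63
  simpa using this

theorem toNat32 (x : Nat) : ((((32:Nat)):Int) + (x:Nat)).toNat = 32 + x := by omega
theorem toNat32' (x : Nat) : (((32:Int)) + (x:Nat)).toNat = 32 + x := by omega

theorem altInner_cast (N : Nat) : altInner (N:Int) =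
    [Char.ofNat (32 + (N &&& 63)), Char.ofNat (32 + (N >>> 6 &&& 63)),
     Char.ofNat (32 + (N >>> 12 &&& 63)), Char.ofNat (32 + (N >>> 18 &&& 63))] := by
  have hr : PySem.List.pyRange 0 4 1 = [0, 1, 2, 3] := by decide
  simp only [altInner, hr, List.map_cons, List.map_nil]
  have t0 : ((6 * (0:Int))).toNat = 0 := rfl
  have t1 : ((6 * (1:Int))).toNat = 6 := rfl
  have t2 : ((6 * (2:Int))).toNat = 12 := rfl
  have t3 : ((6 * (3:Int))).toNat = 18 := rfl
  rw [t0, t1, t2, t3, band_cast63 N 0, band_cast63 N 6, band_cast63 N 12, band_cast63 N 18,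
      Nat.shiftRight_zero]
  simp only [toNat32]

-- the heart of the equivalence: A's four bespoke masked/shifted chars for one chunk are
-- B's four uniform 6-bit extractions from the combined 24-bit word
set_option maxRecDepth 1000000 in
theorem chunk_eq (c0 c1 c2 : Int) : aChunk c0 c1 c2 = altInner (bVal c0 c1 c2) := by
  have hv := bVal_eq c0 c1 c2
  have h0 := pvByte_lt c0
  have h1 := pvByte_lt c1
  have h2 := pvByte_lt c2
  have e63 := band_byte c0 63 (by decide) (by decide) (by decide)
  have e192 := band_byte c0 192 (by decide) (by decide) (by decide)
  have e15 := band_byte c1 15 (by decide) (by decide) (by decide)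
  have e240 := band_byte c1 240 (by decide) (by decide) (by decide)
  have e3 := band_byte c2 3 (by decide) (by decide) (by decide)
  have e252 := band_byte c2 252 (by decide) (by decide) (by decide)
  simp only [Nat.cast_ofNat] at e63 e192 e15 e240 e3 e252
  set m0 := pvByte c0 with hm0
  set m1 := pvByte c1 with hm1
  set m2 := pvByte c2 with hm2
  set N : Nat := m0 + (m1 <<< 8) + (m2 <<< 16) with hN
  simp only [aChunk]
  rw [hv, altInner_cast N]
  rw [e63, e192, e15, e240, e3, e252,
      ← Int.natCast_shiftRight, ← Int.natCast_shiftRight, ← Int.natCast_shiftRight,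
      ← Int.natCast_shiftLeft, ← Int.natCast_shiftLeft,
      PySem.Int.bor_natCast, PySem.Int.bor_natCast]
  simp only [toNat32']
  rw [pvG0 m0 m1 m2, pvG1 m0 m1 m2 h0 h1, pvG2 m0 m1 m2 h0 h1 h2, pvG3 m0 m1 m2 h0 h1 h2]

theorem push4 (s : String) (a b c d : Char) :
    (((s.push a).push b).push c).push d = s ++ String.ofList [a, b, c, d] := by
  apply String.toList_inj.mp
  simp [String.toList_push]

theorem ofList_append (a b : List Char) :
    String.ofList (a ++ b) = String.ofList a ++ String.ofList b := by
  apply String.toList_inj.mp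
  simp

-- one step of A's loop
theorem loopA_cons (c0 c1 c2 : Int) (rest : List Int) (s : String) :
    unpackLoopA (c0 :: c1 :: c2 :: rest) s = unpackLoopA rest (s ++ String.ofList (aChunk c0 c1 c2)) := by
  have g0 : (PySem.List.pyGet? [c0, c1, c2] 0).getD 0 = c0 := by simp [pysem]
  have g1 : (PySem.List.pyGet? [c0, c1, c2] 1).getD 0 = c1 := by simp [pysem]
  have g2 : (PySem.List.pyGet? [c0, c1, c2] 2).getD 0 = c2 := by simp [pysem]
  rw [unpackLoopA]
  simp only [show (c0 :: c1 :: c2 :: rest).take 3 = [c0, c1, c2] from rfl,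
             show (c0 :: c1 :: c2 :: rest).drop 3 = rest from rfl, g0, g1, g2, push4]
  rw [aChunk]

-- B's value for the chunk starting at index i, exactly as unpack6bitascii_alt computes it
def pvVal (l : List Int) (i : Int) : Int :=
  PySem.Int.band ((PySem.List.pyGet? l i).getD 0) 255
  + (PySem.Int.band ((PySem.List.pyGet? l (i + 1)).getD 0) 255) <<< (8:Nat)
  + (PySem.Int.band ((PySem.List.pyGet? l (i + 2)).getD 0) 255) <<< (16:Nat)

theorem alt_flat (l : List Int) :
    unpack6bitascii_alt l =
      String.ofList ((PySem.List.pyRange 0 (PySem.List.len l) 3).flatMap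
        (fun i => altInner (pvVal l i))) := by
  unfold unpack6bitascii_alt
  rw [show (fun (acc : List Char) (i : Int) =>
        let val : Int :=
          PySem.Int.band ((PySem.List.pyGet? l i).getD 0) 255
          + (PySem.Int.band ((PySem.List.pyGet? l (i + 1)).getD 0) 255) <<< (8:Nat)
          + (PySem.Int.band ((PySem.List.pyGet? l (i + 2)).getD 0) 255) <<< (16:Nat)
        acc ++ altInner val) = (fun acc i => acc ++ altInner (pvVal l i)) from rfl]
  rw [PySem.List.foldl_append_eq_flatMap]
  rfl

theorem range3 (n : Nat) (h : n % 3 = 0) :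
    PySem.List.pyRange 0 ((n : Nat) : Int) 3 = (List.range (n / 3)).map (fun k => ((3 * k : Nat) : Int)) := by
  rw [PySem.List.pyRange_of_pos _ _ (by norm_num : (0:Int) < 3)]
  have hc : (if (0:Int) < (n:Int) then ((((n:Int)) - 0 + 3 - 1) / 3).toNat else 0) = n / 3 := by
    split_ifs with hb
    · omega
    · omega
  rw [hc]
  apply List.map_congr_left
  intro k _
  push_cast
  ring

theorem alt_nil : unpack6bitascii_alt [] = "" := by
  rw [alt_flat]
  rfl

theorem pvVal_zero (c0 c1 c2 : Int) (rest : List Int) :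
    pvVal (c0 :: c1 :: c2 :: rest) ((3 * 0 : Nat) : Int) = bVal c0 c1 c2 := by
  unfold pvVal bVal
  norm_num
  have g1 : (PySem.List.pyGet? (c0 :: c1 :: c2 :: rest) 1).getD 0 = c1 := by simp [pysem]
  have g2 : (PySem.List.pyGet? (c0 :: c1 :: c2 :: rest) 2).getD 0 = c2 := by simp [pysem]
  rw [g1, g2]

theorem pvVal_shift (c0 c1 c2 : Int) (rest : List Int) (k : Nat) :
    pvVal (c0 :: c1 :: c2 :: rest) ((3 * (k + 1) : Nat) : Int) = pvVal rest ((3 * k : Nat) : Int) := by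
  unfold pvVal
  have sh : ∀ (a b : Nat), a = b + 3 →
      PySem.List.pyGet? (c0 :: c1 :: c2 :: rest) ((a : Nat) : Int) = PySem.List.pyGet? rest ((b : Nat) : Int) := by
    intro a b hab
    rw [PySem.List.pyGet?_natCast, PySem.List.pyGet?_natCast,
        show a = ((b + 2) + 1) by omega]
    simp [List.getElem?_cons_succ, show b + 2 = (b + 1) + 1 by omega]
  rw [show ((3*(k+1) : Nat) : Int) + 1 = ((3*(k+1) + 1 : Nat) : Int) by push_cast; ring,
      show ((3*(k+1) : Nat) : Int) + 2 = ((3*(k+1) + 2 : Nat) : Int) by push_cast; ring,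
      show ((3*k : Nat) : Int) + 1 = ((3*k + 1 : Nat) : Int) by push_cast; ring,
      show ((3*k : Nat) : Int) + 2 = ((3*k + 2 : Nat) : Int) by push_cast; ring,
      sh (3*(k+1)) (3*k) (by omega), sh (3*(k+1)+1) (3*k+1) (by omega),
      sh (3*(k+1)+2) (3*k+2) (by omega)]

-- one chunk of B's loop
theorem alt_cons (c0 c1 c2 : Int) (rest : List Int) (h : rest.length % 3 = 0) :
    unpack6bitascii_alt (c0 :: c1 :: c2 :: rest) =
      String.ofList (altInner (bVal c0 c1 c2)) ++ unpack6bitascii_alt rest := by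
  rw [alt_flat, alt_flat]
  have hn : PySem.List.len (c0 :: c1 :: c2 :: rest) = ((rest.length + 3 : Nat) : Int) := by
    simp [PySem.List.len_eq]
    ring
  have hm : PySem.List.len rest = ((rest.length : Nat) : Int) := by simp [PySem.List.len_eq]
  rw [hn, hm, range3 (rest.length + 3) (by omega), range3 rest.length h,
      show (rest.length + 3) / 3 = rest.length / 3 + 1 by omega,
      List.range_succ_eq_map, List.map_cons, List.flatMap_cons, List.map_map,
      List.flatMap_map, List.flatMap_map]
  rw [show ((3 * 0 : Nat) : Int) = ((3 * (0:Nat) : Nat) : Int) from rfl, pvVal_zero]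
  rw [ofList_append]
  congr 1
  apply congrArg
  apply List.flatMap_congr
  intro k _
  show altInner (pvVal (c0 :: c1 :: c2 :: rest) ((3 * (k + 1) : Nat) : Int)) = _
  rw [pvVal_shift]

theorem loopA_eq : ∀ (l : List Int), l.length % 3 = 0 → ∀ s : String,
    unpackLoopA l s = s ++ unpack6bitascii_alt l
  | [], _, s => by rw [alt_nil]; simp [unpackLoopA]
  | [a], h, s => by simp at h
  | [a, b], h, s => by simp at h
  | c0 :: c1 :: c2 :: rest, h, s => by
      have hr : rest.length % 3 = 0 := by simp at h; omega
      rw [loopA_cons, alt_cons c0 c1 c2 rest hr, loopA_eq rest hr, ← String.append_assoc, chunk_eq]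
  termination_by l => l.length

-- ===== VERDICT (by name: the statement is the Claim_ definition above) =====
theorem unpack6bitascii_spec : Claim_equal_unpack6bitascii := by
  intro l _ hpre
  unfold Spec_unpack6bitascii unpack6bitascii
  rw [loopA_eq l hpre ""]
  simp
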